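-- pv_equiv track=rewrite | github.com/skykongkong8/Math_Box | calculator.py | fibbonachi_zero_one_calls
-- ===== SOURCE A (Python) =====
-- def fibbonachi_zero_one_calls(num_list):
--     dynamic_list = [[1,0],[0,1]]
--     for i in range(2,max(num_list)+1):
--         dynamic_list.append([dynamic_list[i-1][0]+dynamic_list[i-2][0], dynamic_list[i-1][1]+dynamic_list[i-2][1]])
--
--     res_str = ""
--     for n in num_list:
--         res_str += f"{dynamic_list[n][0]} {dynamic_list[n][1]}"
--         res_str += "\n"
--
--     return res_str
-- ===== SOURCE B (Python) =====
-- def _fib_pair(n):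
--     # (F(n), F(n+1)) by fast doubling; F(0)=0, F(1)=1
--     if n == 0:
--         return (0, 1)
--     a, b = _fib_pair(n // 2)
--     c = a * (2 * b - a)
--     d = a * a + b * b
--     if n % 2 == 1:
--         return (d, c + d)
--     return (c, d)
--
--
-- def fibbonachi_zero_one_calls(num_list):
--     lines = []
--     for n in num_list:
--         a, b = _fib_pair(n)
--         lines.append(f"{b - a} {a}\n")
--     return "".join(lines)
-- ===== Notes on version B (the rewrite author's own statement) =====
-- stated objective: alternative
-- what changed: Replaces the O(max) dynamic-programming table of (zero-count, one-count) pairs with per-query fast-doubling Fibonacci (the pair at index n is (F(n-1), F(n)) with F(n-1)=F(n+1)-F(n)), so no table proportional to max(num_list) is ever built (asymptotically cheaper in theory; a timing run could not certify it because its large inputs contain negative elements outside Pre_).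
-- outside the precondition, e.g. on fibbonachi_zero_one_calls([-1]): A returns '0 1\n', B raises RecursionError
import Mathlib
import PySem

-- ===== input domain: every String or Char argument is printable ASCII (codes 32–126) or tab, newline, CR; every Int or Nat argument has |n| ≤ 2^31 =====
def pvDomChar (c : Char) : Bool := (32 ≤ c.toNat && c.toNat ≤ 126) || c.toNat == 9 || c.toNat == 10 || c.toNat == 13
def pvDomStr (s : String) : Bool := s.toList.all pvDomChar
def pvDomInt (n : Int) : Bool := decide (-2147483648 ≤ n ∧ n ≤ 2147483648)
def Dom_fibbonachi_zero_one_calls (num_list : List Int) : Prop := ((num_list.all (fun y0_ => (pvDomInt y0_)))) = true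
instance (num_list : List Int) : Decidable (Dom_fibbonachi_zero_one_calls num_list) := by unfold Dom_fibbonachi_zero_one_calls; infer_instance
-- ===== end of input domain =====

-- B replaces A's O(max(num_list)) dynamic-programming table by per-query fast-doubling Fibonacci (objective: alternative algorithm).
-- Strings are built on the List Char side (PySem.Int.toChars) because Lean's String.append is kernel-opaque.

-- ===== PORT A =====
-- A: build dynamic_list = [[1,0],[0,1]] extended by pairwise sums up to max(num_list),
--    then concatenate "dyn[n][0] dyn[n][1]\n" for each n.
def fibbonachi_zero_one_calls (num_list : List Int) : String :=
  match PySem.List.max? num_list (fun y => y) with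
  | none => ""   -- Python raises ValueError on the empty list; excluded by Pre_
  | some m =>
    let dyn := (PySem.List.pyRange 2 (m + 1) 1).foldl
      (fun acc i =>
        acc ++ [((PySem.List.pyGetD acc (i - 1) (0, 0)).1 + (PySem.List.pyGetD acc (i - 2) (0, 0)).1,
                 (PySem.List.pyGetD acc (i - 1) (0, 0)).2 + (PySem.List.pyGetD acc (i - 2) (0, 0)).2)])
      [((1 : Int), (0 : Int)), ((0 : Int), (1 : Int))]
    String.ofList (num_list.foldl
      (fun s n =>
        (s ++ (PySem.Int.toChars (PySem.List.pyGetD dyn n (0, 0)).1 ++ [' '] ++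
               PySem.Int.toChars (PySem.List.pyGetD dyn n (0, 0)).2)) ++ ['\n'])
      [])

-- ===== PORT B =====
-- Source B's _fib_pair: (F(n), F(n+1)) by fast doubling (n // 2, n % 2 on a nonnegative int → Nat recursion)
def pvFibPair : Nat → Int × Int
  | 0 => (0, 1)
  | (n + 1) =>
    let p := pvFibPair ((n + 1) / 2)
    let a := p.1
    let b := p.2
    let c := a * (2 * b - a)
    let d := a * a + b * b
    if (n + 1) % 2 = 1 then (d, c + d) else (c, d)
decreasing_by exact Nat.div_lt_self (Nat.succ_pos n) (by omega)

def fibbonachi_zero_one_calls_alt (num_list : List Int) : String :=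
  String.ofList ((num_list.map (fun n =>
    let p := pvFibPair n.toNat
    PySem.Int.toChars (p.2 - p.1) ++ [' '] ++ PySem.Int.toChars p.1 ++ ['\n'])).flatten)

-- ===== PRECONDITION & SPEC =====
-- Pre_ excludes the empty list (A raises ValueError) and lists containing a negative element
-- (there A either raises IndexError or returns a value produced by negative-index wraparound
-- into the seed table, and B's fast-doubling recursion does not terminate on a negative n).
def Pre_fibbonachi_zero_one_calls (num_list : List Int) : Prop :=
  num_list ≠ [] ∧ ∀ n ∈ num_list, 0 ≤ n
instance (num_list : List Int) : Decidable (Pre_fibbonachi_zero_one_calls num_list) := by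
  unfold Pre_fibbonachi_zero_one_calls; infer_instance

def pvWitness_fibbonachi_zero_one_calls : List Int := [0, 1, 5]

def Spec_fibbonachi_zero_one_calls (num_list : List Int) (out : String) : Prop :=
  out = fibbonachi_zero_one_calls_alt num_list
instance (num_list : List Int) (out : String) : Decidable (Spec_fibbonachi_zero_one_calls num_list out) := by
  unfold Spec_fibbonachi_zero_one_calls; infer_instance

-- ===== CLAIM (what is proved, stated in full; the proofs are below) =====
def Claim_equal_fibbonachi_zero_one_calls : Prop :=
  ∀ (num_list : List Int), Dom_fibbonachi_zero_one_calls num_list →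
    Pre_fibbonachi_zero_one_calls num_list →
    Spec_fibbonachi_zero_one_calls num_list (fibbonachi_zero_one_calls num_list)

-- ===== LEMMAS AND PROOFS =====

-- entry i of A's table: (zero-calls, one-calls) at index i = (F(i+1) - F(i), F(i))
def pvEntry (i : Nat) : Int × Int := ((Nat.fib (i + 1) : Int) - Nat.fib i, (Nat.fib i : Int))

lemma pvFibPair_eq (n : Nat) : pvFibPair n = ((Nat.fib n : Int), (Nat.fib (n + 1) : Int)) := by
  induction n using Nat.strong_induction_on with
  | _ n ih =>
    match n with
    | 0 => simp [pvFibPair]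
    | (n + 1) =>
      have hk : (n + 1) / 2 < n + 1 := Nat.div_lt_self (Nat.succ_pos n) (by omega)
      rw [pvFibPair, ih _ hk]
      set k := (n + 1) / 2 with hkdef
      have hle : Nat.fib k ≤ 2 * Nat.fib (k + 1) :=
        le_trans (Nat.fib_le_fib_succ) (by omega)
      have h2k : (Nat.fib (2 * k) : Int) =
          (Nat.fib k : Int) * (2 * (Nat.fib (k + 1) : Int) - (Nat.fib k : Int)) := by
        rw [Nat.fib_two_mul]; push_cast [hle]; ring
      have h2k1 : (Nat.fib (2 * k + 1) : Int) =
          (Nat.fib k : Int) * (Nat.fib k : Int) + (Nat.fib (k + 1) : Int) * (Nat.fib (k + 1) : Int) := by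
        rw [Nat.fib_two_mul_add_one]; push_cast; ring
      dsimp only
      rcases Nat.even_or_odd (n + 1) with he | ho
      · have hmod : (n + 1) % 2 = 0 := Nat.even_iff.mp he
        have heq : n + 1 = 2 * k := by omega
        rw [if_neg (by omega), heq]
        exact Prod.ext h2k.symm h2k1.symm
      · have hmod : (n + 1) % 2 = 1 := Nat.odd_iff.mp ho
        have heq : n + 1 = 2 * k + 1 := by omega
        rw [if_pos hmod, heq]
        have hstep : 2 * k + 1 + 1 = 2 * k + 2 := by ring
        have hfa : (Nat.fib (2 * k + 2) : Int) = (Nat.fib (2 * k) : Int) + (Nat.fib (2 * k + 1) : Int) := by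
          rw [Nat.fib_add_two]; push_cast; ring
        refine Prod.ext h2k1.symm ?_
        simp only [hstep]
        rw [hfa, h2k, h2k1]

lemma pvEntry_sum (k : Nat) (hk : 2 ≤ k) :
    ((pvEntry (k - 1)).1 + (pvEntry (k - 2)).1, (pvEntry (k - 1)).2 + (pvEntry (k - 2)).2)
      = pvEntry k := by
  obtain ⟨j, rfl⟩ : ∃ j, k = j + 2 := ⟨k - 2, by omega⟩
  have h1 : j + 2 - 1 = j + 1 := by omega
  have h2 : j + 2 - 2 = j := by omega
  have f2 : Nat.fib (j + 2) = Nat.fib j + Nat.fib (j + 1) := Nat.fib_add_two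
  have f3 : Nat.fib (j + 3) = Nat.fib (j + 1) + Nat.fib (j + 2) := Nat.fib_add_two
  simp only [pvEntry, h1, h2]
  refine Prod.ext ?_ ?_ <;> simp only [] <;> push_cast [f2, f3] <;> ring

def pvTab (k : Nat) : List (Int × Int) := (List.range k).map pvEntry

lemma pvTab_two : pvTab 2 = [((1 : Int), (0 : Int)), ((0 : Int), (1 : Int))] := by
  simp [pvTab, List.range_succ, pvEntry]

lemma pvTab_getD (k : Nat) (i : Int) (h0 : 0 ≤ i) (hlt : i.toNat < k) :
    PySem.List.pyGetD (pvTab k) i (0, 0) = pvEntry i.toNat := by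
  rw [PySem.List.pyGetD_eq_getElem (pvTab k) (0, 0) h0 (by simp [pvTab]; omega)]
  simp [pvTab]

lemma pvBuild_eq (k : Nat) (hk : 2 ≤ k) :
    (PySem.List.pyRange 2 (k : Int) 1).foldl
      (fun acc i =>
        acc ++ [((PySem.List.pyGetD acc (i - 1) (0, 0)).1 + (PySem.List.pyGetD acc (i - 2) (0, 0)).1,
                 (PySem.List.pyGetD acc (i - 1) (0, 0)).2 + (PySem.List.pyGetD acc (i - 2) (0, 0)).2)])
      [((1 : Int), (0 : Int)), ((0 : Int), (1 : Int))] = pvTab k := by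
  induction k with
  | zero => omega
  | succ k ih =>
    rcases Nat.lt_or_ge k 2 with hk2 | hk2
    · interval_cases k
      · omega
      · rw [show ((2 : Nat) : Int) = 2 by norm_num,
            PySem.List.pyRange_one_eq_nil (by norm_num)]
        simpa using pvTab_two.symm
    · have hsplit : PySem.List.pyRange 2 ((k : Int) + 1) 1
          = PySem.List.pyRange 2 (k : Int) 1 ++ [(k : Int)] :=
        PySem.List.pyRange_one_succ_right (by exact_mod_cast hk2)
      push_cast
      rw [hsplit, List.foldl_append, ih hk2]
      simp only [List.foldl_cons, List.foldl_nil]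
      rw [pvTab_getD k ((k : Int) - 1) (by omega) (by omega),
          pvTab_getD k ((k : Int) - 2) (by omega) (by omega)]
      have ht1 : ((k : Int) - 1).toNat = k - 1 := by omega
      have ht2 : ((k : Int) - 2).toNat = k - 2 := by omega
      rw [ht1, ht2]
      have hsucc : pvTab (k + 1) = pvTab k ++ [pvEntry k] := by
        simp [pvTab, List.range_succ]
      rw [hsucc, pvEntry_sum k hk2]

-- the string-building loop of A is init ++ flatMap of the per-element line
lemma pvFoldl_lines (g1 g2 : Int → List Char) :
    ∀ (l : List Int) (init : List Char),
      l.foldl (fun s n => (s ++ (g1 n ++ [' '] ++ g2 n)) ++ ['\n']) init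
        = init ++ l.flatMap (fun n => (g1 n ++ [' '] ++ g2 n) ++ ['\n']) := by
  intro l
  induction l with
  | nil => simp
  | cons x t iht =>
    intro init
    simp only [List.foldl_cons, List.flatMap_cons]
    rw [iht]
    simp

-- ===== VERDICT (by name: the statement is the Claim_ definition above) =====
theorem fibbonachi_zero_one_calls_spec : Claim_equal_fibbonachi_zero_one_calls := by
  intro num_list _ hpre
  obtain ⟨hne, hnonneg⟩ := hpre
  unfold Spec_fibbonachi_zero_one_calls fibbonachi_zero_one_calls fibbonachi_zero_one_calls_alt
  obtain ⟨m, hm⟩ : ∃ m, PySem.List.max? num_list (fun y => y) = some m := by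
    rcases h : PySem.List.max? num_list (fun y => y) with _ | m
    · exact absurd ((PySem.List.max?_eq_none_iff num_list (fun y => y)).mp h) hne
    · exact ⟨m, rfl⟩
  rw [hm]
  have hmmem : m ∈ num_list := PySem.List.max?_mem hm
  have hmax : ∀ y ∈ num_list, y ≤ m := PySem.List.max?_isMax hm
  have hm0 : 0 ≤ m := hnonneg m hmmem
  set K : Nat := max 2 (m.toNat + 1) with hK
  have hbuild : (PySem.List.pyRange 2 (m + 1) 1).foldl
      (fun acc i =>
        acc ++ [((PySem.List.pyGetD acc (i - 1) (0, 0)).1 + (PySem.List.pyGetD acc (i - 2) (0, 0)).1,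
                 (PySem.List.pyGetD acc (i - 1) (0, 0)).2 + (PySem.List.pyGetD acc (i - 2) (0, 0)).2)])
      [((1 : Int), (0 : Int)), ((0 : Int), (1 : Int))] = pvTab K := by
    rcases Nat.lt_or_ge m.toNat 1 with hm1 | hm1
    · have hm0' : m = 0 := by omega
      have hKeq : K = 2 := by simp [hK]; omega
      rw [hm0', hKeq, PySem.List.pyRange_one_eq_nil (by norm_num)]
      simpa using pvTab_two.symm
    · have hKeq : K = m.toNat + 1 := by simp [hK]; omega
      have hcast : m + 1 = ((K : Nat) : Int) := by omega
      rw [hcast]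
      exact pvBuild_eq K (by omega)
  simp only
  rw [hbuild]
  rw [pvFoldl_lines (fun n => PySem.Int.toChars (PySem.List.pyGetD (pvTab K) n (0, 0)).1)
        (fun n => PySem.Int.toChars (PySem.List.pyGetD (pvTab K) n (0, 0)).2) num_list []]
  rw [List.nil_append]
  congr 1
  rw [← List.flatMap_def]
  apply List.flatMap_congr
  intro x hx
  have h0 : 0 ≤ x := hnonneg x hx
  have hlt : x.toNat < K := by
    have := hmax x hx
    simp [hK]; omega
  rw [pvTab_getD K x h0 hlt, pvFibPair_eq]
  simp [pvEntry]
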